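-- pv_equiv track=rewrite | github.com/sheryfarid/DSA | DSA/relativrank.py | relativerank
-- ===== SOURCE A (Python) =====
-- def relativerank(score):
--     indexed_score = [(s, i) for i, s in enumerate(score)]
--
--     indexed_score.sort(reverse=True, key=lambda x: x[0])
--
--     result = [None] * len(score)
--
--     for rank, (s, i) in enumerate(indexed_score):
--         if rank == 0:
--             result[i] = "Gold Medal"
--         elif rank == 1:
--             result[i] = "Silver Medal"
--         elif rank == 2:
--             result[i] = "Bronze Medal"
--         else:
--             result[i] = str(rank + 1)
--
--     return result
-- ===== SOURCE B (Python) =====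
-- def relativerank(score):
--     out = []
--     for i, s in enumerate(score):
--         rank = 1 + len([t for t in score if t > s]) + len([t for t in score[:i] if t == s])
--         if rank == 1:
--             out.append("Gold Medal")
--         elif rank == 2:
--             out.append("Silver Medal")
--         elif rank == 3:
--             out.append("Bronze Medal")
--         else:
--             out.append(str(rank))
--     return out
-- ===== Notes on version B (the rewrite author's own statement) =====
-- stated objective: alternative
-- what changed: Replaces the sort-then-scatter-by-stored-index strategy with a direct counting formula: each score's rank is 1 + (scores strictly greater) + (equal scores earlier in the list), so no sort and no index bookkeeping, and the output is built left to right.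
import Mathlib
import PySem

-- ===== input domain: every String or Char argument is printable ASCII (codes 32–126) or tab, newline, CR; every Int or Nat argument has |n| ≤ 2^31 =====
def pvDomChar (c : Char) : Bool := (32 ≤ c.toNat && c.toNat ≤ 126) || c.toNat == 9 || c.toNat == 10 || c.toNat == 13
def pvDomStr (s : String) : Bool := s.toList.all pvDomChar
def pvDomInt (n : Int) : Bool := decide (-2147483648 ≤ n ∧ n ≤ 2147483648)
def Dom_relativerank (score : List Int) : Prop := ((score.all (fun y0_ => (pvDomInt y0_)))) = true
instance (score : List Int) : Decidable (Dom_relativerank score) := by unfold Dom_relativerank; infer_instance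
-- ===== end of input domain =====

-- B replaces A's sort-then-scatter-by-stored-index with a direct per-element counting formula (no sort, output built left to right); equal return value proved on all inputs.

-- ===== PORT A =====
-- result = [None] * len(score): every slot is assigned before the return, so the
-- placeholder "" below is never visible in the returned value.
def relativerank (score : List Int) : List String :=
  let indexed_score : List (Int × Int) :=
    (PySem.List.enumerate score).map (fun p => (p.2, p.1))
  let sorted_is := PySem.List.sorted indexed_score (fun x => x.1) true
  (PySem.List.enumerate sorted_is).foldl
    (fun result q =>
      PySem.List.pySetD result q.2.2
        (if q.1 = 0 then "Gold Medal"
         else if q.1 = 1 then "Silver Medal"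
         else if q.1 = 2 then "Bronze Medal"
         else PySem.Int.toStr (q.1 + 1)))
    (List.replicate score.length "")

-- ===== PORT B =====
def relativerank_alt (score : List Int) : List String :=
  (PySem.List.enumerate score).foldl
    (fun out p =>
      let rank : Int := 1 + ((score.filter (fun t => decide (p.2 < t))).length : Int)
        + (((PySem.List.slice score none (some p.1)).filter (fun t => t == p.2)).length : Int)
      out ++ [if rank = 1 then "Gold Medal"
              else if rank = 2 then "Silver Medal"
              else if rank = 3 then "Bronze Medal"
              else PySem.Int.toStr rank])
    []

-- ===== PRECONDITION & SPEC =====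
def Spec_relativerank (score : List Int) (out : List String) : Prop := out = relativerank_alt score
instance (score : List Int) (out : List String) : Decidable (Spec_relativerank score out) := by unfold Spec_relativerank; infer_instance

-- ===== CLAIM (what is proved, stated in full; the proofs are below) =====
def Claim_equal_relativerank : Prop := ∀ (score : List Int), Dom_relativerank score → Spec_relativerank score (relativerank score)

-- ===== LEMMAS AND PROOFS =====

-- The strict total order that characterises A's stable descending sort of
-- (score, index) pairs: higher score first, ties by lower original index first.
def rrLt (p q : Int × Int) : Bool :=
  decide (q.1 < p.1) || (decide (p.1 = q.1) && decide (p.2 < q.2))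

-- The rank label A stores (rank is 0-based there).
def rlabel (r : Int) : String :=
  if r = 0 then "Gold Medal"
  else if r = 1 then "Silver Medal"
  else if r = 2 then "Bronze Medal"
  else PySem.Int.toStr (r + 1)

-- The label B computes for the entry p = (index, score) of enumerate(score).
def bLabel (score : List Int) (p : Int × Int) : String :=
  let rank : Int := 1 + ((score.filter (fun t => decide (p.2 < t))).length : Int)
    + (((PySem.List.slice score none (some p.1)).filter (fun t => decide (t = p.2))).length : Int)
  if rank = 1 then "Gold Medal"
  else if rank = 2 then "Silver Medal"
  else if rank = 3 then "Bronze Medal"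
  else PySem.Int.toStr rank

lemma rr_insertBy_pairwise (x : Int × Int) (ys : List (Int × Int))
    (h1 : ys.Pairwise (fun p q => rrLt p q))
    (h2 : ∀ y ∈ ys, y.2 < x.2) :
    (PySem.List.insertBy (fun a b => decide (b.1 < a.1)) x ys).Pairwise (fun p q => rrLt p q) := by
  induction ys with
  | nil => simp [PySem.List.insertBy]
  | cons y t ih =>
    by_cases hxy : y.1 < x.1
    · rw [show PySem.List.insertBy (fun a b => decide (b.1 < a.1)) x (y :: t)
          = x :: y :: t by simp [PySem.List.insertBy, hxy]]
      refine List.Pairwise.cons ?_ h1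
      intro z hz
      rcases List.mem_cons.mp hz with rfl | hzt
      · simp only [rrLt]; simp; omega
      · have hyz := List.rel_of_pairwise_cons h1 hzt
        simp only [rrLt] at hyz ⊢; simp at hyz ⊢; omega
    · rw [show PySem.List.insertBy (fun a b => decide (b.1 < a.1)) x (y :: t)
          = y :: PySem.List.insertBy (fun a b => decide (b.1 < a.1)) x t by
            simp [PySem.List.insertBy, hxy]]
      refine List.Pairwise.cons ?_ (ih h1.tail (fun z hz => h2 z (List.mem_cons_of_mem _ hz)))
      intro z hz
      rcases (PySem.List.mem_insertBy _ x z t).mp hz with rfl | hzt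
      · have hy2 : y.2 < z.2 := h2 y (by simp)
        simp only [rrLt]; simp; omega
      · exact List.rel_of_pairwise_cons h1 hzt

lemma rr_foldl_insertBy_pairwise (xs : List (Int × Int)) (acc : List (Int × Int))
    (hacc : acc.Pairwise (fun p q => rrLt p q))
    (hcross : ∀ a ∈ acc, ∀ z ∈ xs, a.2 < z.2)
    (hxs : xs.Pairwise (fun p q => p.2 < q.2)) :
    (xs.foldl (fun acc x => PySem.List.insertBy (fun a b => decide (b.1 < a.1)) x acc) acc).Pairwise
      (fun p q => rrLt p q) := by
  induction xs generalizing acc with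
  | nil => simpa using hacc
  | cons x t ih =>
    simp only [List.foldl_cons]
    refine ih _ (rr_insertBy_pairwise x acc hacc (fun a ha => hcross a ha x (by simp))) ?_ hxs.tail
    intro a ha z hz
    rcases (PySem.List.mem_insertBy _ x a acc).mp ha with rfl | haacc
    · exact List.rel_of_pairwise_cons hxs hz
    · exact hcross a haacc z (List.mem_cons_of_mem _ hz)

lemma rr_sorted_pairwise (xs : List (Int × Int)) (hxs : xs.Pairwise (fun p q => p.2 < q.2)) :
    (PySem.List.sorted xs (fun x => x.1) true).Pairwise (fun p q => rrLt p q) := by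
  rw [PySem.List.sorted_rev_eq_foldl_insertBy]
  exact rr_foldl_insertBy_pairwise xs [] (by simp) (by simp) hxs

-- in a pairwise rrLt-ordered list, the position of an element counts the
-- elements rrLt-below it
lemma rr_countP_pos (S : List (Int × Int)) (hS : S.Pairwise (fun p q => rrLt p q))
    (p : Nat) (hp : p < S.length) (e : Int × Int) (he : S[p] = e) :
    S.countP (fun y => rrLt y e) = p := by
  have hsplit : S.take p ++ S[p] :: S.drop (p + 1) = S := by
    rw [List.getElem_cons_drop]; exact List.take_append_drop p S
  have h1 : (S.take p).countP (fun y => rrLt y e) = p := by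
    have hall : ∀ a ∈ S.take p, (fun y => rrLt y e) a = true := by
      intro a ha
      obtain ⟨q, hq, rfl⟩ := List.mem_iff_getElem.mp ha
      have hq' : q < p := by simp [List.length_take] at hq; omega
      rw [List.getElem_take]
      have hqp := List.pairwise_iff_getElem.mp hS q p (by omega) hp hq'
      rw [he] at hqp
      exact hqp
    rw [List.countP_eq_length.mpr hall]
    simp [List.length_take]; omega
  have h2 : (S.drop (p + 1)).countP (fun y => rrLt y e) = 0 := by
    apply List.countP_eq_zero.mpr
    intro a ha
    obtain ⟨q, hq, rfl⟩ := List.mem_iff_getElem.mp ha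
    have hq' : p + 1 + q < S.length := by simp [List.length_drop] at hq; omega
    rw [List.getElem_drop]
    have hlt := List.pairwise_iff_getElem.mp hS p (p + 1 + q) hp hq' (by omega)
    rw [he] at hlt
    simp only [rrLt] at hlt ⊢; simp at hlt ⊢; omega
  have h3 : ¬ ((fun y => rrLt y e) S[p] = true) := by
    rw [he]
    simp only [rrLt]; simp
  conv_lhs => rw [← hsplit]
  rw [List.countP_append, List.countP_cons]
  simp only [h1, h2, h3]
  simp

lemma rr_countP_enum_gt (s : Int) (l : List Int) (k : Int) :
    (PySem.List.enumerate l k).countP (fun q => decide (s < q.2))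
      = l.countP (fun t => decide (s < t)) := by
  conv_rhs => rw [← PySem.List.map_snd_enumerate l k]
  rw [List.countP_map]
  rfl

lemma rr_countP_enum_lt_zero (s : Int) (l : List Int) (k b : Int) (hb : b ≤ k) :
    (PySem.List.enumerate l k).countP (fun q => decide (q.2 = s) && decide (q.1 < b)) = 0 := by
  apply List.countP_eq_zero.mpr
  intro q hq
  obtain ⟨j, hj, rfl⟩ := (PySem.List.mem_enumerate_iff l k q).mp hq
  simp
  omega

lemma rr_countP_enum_eq (s : Int) (l : List Int) (k : Int) (i : Nat) :
    (PySem.List.enumerate l k).countP (fun q => decide (q.2 = s) && decide (q.1 < k + (i : Int)))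
      = (l.take i).countP (fun t => decide (t = s)) := by
  induction l generalizing k i with
  | nil => simp [PySem.List.enumerate]
  | cons x t ih =>
    rw [PySem.List.enumerate_cons]
    cases i with
    | zero =>
      rw [List.countP_cons]
      rw [rr_countP_enum_lt_zero s t (k + 1) (k + (0 : Nat)) (by simp)]
      simp
    | succ j =>
      rw [List.countP_cons]
      have hb : k + ((j + 1 : Nat) : Int) = (k + 1) + (j : Int) := by push_cast; ring
      simp only [hb]
      rw [ih (k + 1) j]
      have hklt : (k : Int) < (k + 1) + (j : Int) := by omega
      rw [List.take_succ_cons, List.countP_cons]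
      simp [hklt]

lemma rr_countP_or (l : List (Int × Int)) (f g : Int × Int → Bool)
    (h : ∀ a ∈ l, ¬(f a = true ∧ g a = true)) :
    l.countP (fun a => f a || g a) = l.countP f + l.countP g := by
  induction l with
  | nil => simp
  | cons a t ih =>
    have ht : ∀ b ∈ t, ¬(f b = true ∧ g b = true) := fun b hb => h b (List.mem_cons_of_mem _ hb)
    have ha := h a (by simp)
    simp only [List.countP_cons, ih ht]
    cases hf : f a <;> cases hg : g a <;> simp_all <;> omega

lemma rr_scatter_length (v : Int → String) (L : List (Int × (Int × Int))) (r : List String) :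
    (L.foldl (fun acc q => PySem.List.pySetD acc q.2.2 (v q.1)) r).length = r.length := by
  induction L generalizing r with
  | nil => rfl
  | cons q t ih => rw [List.foldl_cons, ih, PySem.List.length_pySetD]

lemma rr_scatter_skip (v : Int → String) (L : List (Int × (Int × Int))) (r : List String) (i : Nat)
    (h : ∀ q ∈ L, 0 ≤ q.2.2 ∧ q.2.2 ≠ (i : Int)) :
    (L.foldl (fun acc q => PySem.List.pySetD acc q.2.2 (v q.1)) r)[i]? = r[i]? := by
  induction L generalizing r with
  | nil => rfl
  | cons q t ih =>
    rw [List.foldl_cons, ih _ (fun q' hq' => h q' (List.mem_cons_of_mem _ hq'))]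
    obtain ⟨hpos, hne⟩ := h q (by simp)
    rw [PySem.List.pySetD_of_nonneg _ _ hpos, List.getElem?_set]
    have hne' : q.2.2.toNat ≠ i := by omega
    simp [hne']

-- value of A's scatter at index i, when i sits at sorted position p
lemma rr_A_get (S : List (Int × Int)) (n : Nat) (i p : Nat) (hi : i < n) (hp : p < S.length)
    (hSp2 : S[p].2 = (i : Int))
    (hpos : ∀ y ∈ S, 0 ≤ y.2)
    (hinj : ∀ q (hq : q < S.length), q ≠ p → S[q].2 ≠ (i : Int)) :
    ((PySem.List.enumerate S).foldl (fun r q => PySem.List.pySetD r q.2.2 (rlabel q.1))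
        (List.replicate n ""))[i]? = some (rlabel (p : Int)) := by
  have hsplit : S.take p ++ S[p] :: S.drop (p + 1) = S := by
    rw [List.getElem_cons_drop]; exact List.take_append_drop p S
  have hlt : (S.take p).length = p := by simp [List.length_take]; omega
  conv_lhs => rw [← hsplit]
  rw [PySem.List.enumerate_append, PySem.List.enumerate_cons, List.foldl_append, List.foldl_cons]
  rw [rr_scatter_skip]
  · rw [hSp2, PySem.List.pySetD_natCast, List.getElem?_set]
    have hlen : (((PySem.List.enumerate (S.take p)).foldl
        (fun r q => PySem.List.pySetD r q.2.2 (rlabel q.1)) (List.replicate n ""))).length = n := by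
      rw [rr_scatter_length]; simp
    simp only [hlen, if_pos hi, hlt]
    norm_num
  · intro q hq
    obtain ⟨k, hk, rfl⟩ := (PySem.List.mem_enumerate_iff _ _ _).mp hq
    have hk' : p + 1 + k < S.length := by simp [List.length_drop] at hk; omega
    have hel : (S.drop (p + 1))[k] = S[p + 1 + k] := List.getElem_drop
    constructor
    · have hmem : (S.drop (p + 1))[k] ∈ S := by
        rw [hel]; exact List.getElem_mem _
      exact hpos _ hmem
    · rw [hel]
      exact hinj (p + 1 + k) hk' (by omega)

-- final per-index label agreement
lemma rr_label_eq (p a b : Nat) (hab : a + b = p) :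
    (if (1 + (a : Int) + (b : Int)) = 1 then "Gold Medal"
     else if (1 + (a : Int) + (b : Int)) = 2 then "Silver Medal"
     else if (1 + (a : Int) + (b : Int)) = 3 then "Bronze Medal"
     else PySem.Int.toStr (1 + (a : Int) + (b : Int))) = rlabel (p : Int) := by
  have h1 : (1 + (a : Int) + (b : Int)) = (p : Int) + 1 := by omega
  rw [h1]
  unfold rlabel
  split_ifs <;> first | rfl | omega

lemma rr_main (score : List Int) : relativerank score = relativerank_alt score := by
  have hB : relativerank_alt score = (PySem.List.enumerate score).map (bLabel score) := by
    show (PySem.List.enumerate score).foldl (fun out p => out ++ [bLabel score p]) [] = _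
    rw [PySem.List.foldl_append_singleton_eq_map]
    simp
  have hA : relativerank score
      = (PySem.List.enumerate (PySem.List.sorted
            ((PySem.List.enumerate score).map (fun p => (p.2, p.1))) (fun x => x.1) true)).foldl
          (fun r q => PySem.List.pySetD r q.2.2 (rlabel q.1))
          (List.replicate score.length "") := rfl
  rw [hA, hB]
  have hlenIS : ((PySem.List.enumerate score).map (fun p : Int × Int => (p.2, p.1))).length
      = score.length := by simp [PySem.List.length_enumerate]
  have hperm := PySem.List.sorted_perm
      ((PySem.List.enumerate score).map (fun p : Int × Int => (p.2, p.1))) (fun x => x.1) true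
  have hlenS : (PySem.List.sorted ((PySem.List.enumerate score).map (fun p => (p.2, p.1)))
      (fun x : Int × Int => x.1) true).length = score.length := by
    rw [hperm.length_eq, hlenIS]
  have hpairIS : ((PySem.List.enumerate score).map
      (fun p : Int × Int => (p.2, p.1))).Pairwise (fun p q => p.2 < q.2) := by
    rw [List.pairwise_map]
    simpa using PySem.List.pairwise_lt_enumerate score 0
  have hpairS := rr_sorted_pairwise _ hpairIS
  have hmemIS : ∀ y ∈ (PySem.List.enumerate score).map (fun p : Int × Int => (p.2, p.1)),
      ∃ (j : Nat) (hj : j < score.length), y = (score[j], (j : Int)) := by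
    intro y hy
    obtain ⟨q, hq, rfl⟩ := List.mem_map.mp hy
    obtain ⟨j, hj, rfl⟩ := (PySem.List.mem_enumerate_iff _ _ _).mp hq
    exact ⟨j, hj, by simp⟩
  have hnd : ((PySem.List.sorted ((PySem.List.enumerate score).map (fun p => (p.2, p.1)))
      (fun x : Int × Int => x.1) true).map (fun y => y.2)).Nodup := by
    refine ((hperm.map (fun y : Int × Int => y.2)).nodup_iff).mpr ?_
    rw [List.map_map]
    have : ((fun y : Int × Int => y.2) ∘ (fun p : Int × Int => (p.2, p.1)))
        = (fun p : Int × Int => p.1) := rfl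
    rw [this, PySem.List.map_fst_enumerate]
    exact PySem.List.nodup_pyRange_one _ _
  apply List.ext_getElem
  · rw [rr_scatter_length]; simp [PySem.List.length_enumerate]
  · intro i h1 h2
    have hi : i < score.length := by
      simpa [PySem.List.length_enumerate] using h2
    -- the element of the indexed list that carries original index i
    have hmem : ((score[i], (i : Int)) : Int × Int) ∈ PySem.List.sorted
        ((PySem.List.enumerate score).map (fun p => (p.2, p.1))) (fun x : Int × Int => x.1) true := by
      rw [hperm.mem_iff]
      exact List.mem_map.mpr ⟨((i : Int), score[i]),
        (PySem.List.mem_enumerate_iff _ _ _).mpr ⟨i, hi, by simp⟩, rfl⟩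
    obtain ⟨p, hp, hSp⟩ := List.mem_iff_getElem.mp hmem
    -- A's value at i is rlabel p
    have hAi := rr_A_get _ score.length i p hi hp (by rw [hSp])
      (by
        intro y hy
        obtain ⟨j, hj, rfl⟩ := hmemIS y (hperm.mem_iff.mp hy)
        simp)
      (by
        intro q hq hqp
        intro hcon
        have h1' : ((PySem.List.sorted ((PySem.List.enumerate score).map (fun p => (p.2, p.1)))
            (fun x : Int × Int => x.1) true).map (fun y => y.2))[q]'(by simpa using hq)
            = ((PySem.List.sorted ((PySem.List.enumerate score).map (fun p => (p.2, p.1)))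
            (fun x : Int × Int => x.1) true).map (fun y => y.2))[p]'(by simpa using hp) := by
          simp only [List.getElem_map]
          rw [hcon, hSp]
        exact hqp (hnd.getElem_inj_iff.mp h1')
      )
    have hAival : ((PySem.List.enumerate (PySem.List.sorted
        ((PySem.List.enumerate score).map (fun p => (p.2, p.1))) (fun x => x.1) true)).foldl
          (fun r q => PySem.List.pySetD r q.2.2 (rlabel q.1))
          (List.replicate score.length ""))[i]'h1 = rlabel (p : Int) := by
      have := List.getElem?_eq_getElem h1
      rw [hAi] at this
      exact (Option.some_injective _ this.symm)
    rw [hAival]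
    -- p equals B's count
    have hcnt := rr_countP_pos _ hpairS p hp _ hSp
    rw [hperm.countP_eq] at hcnt
    rw [List.countP_map] at hcnt
    have hext : ((fun y => rrLt y ((score[i], (i : Int)) : Int × Int))
          ∘ (fun p : Int × Int => (p.2, p.1)))
        = (fun q : Int × Int => (decide (score[i] < q.2))
            || ((decide (q.2 = score[i])) && decide (q.1 < (0 : Int) + (i : Int)))) := by
      funext q
      simp [rrLt]
    rw [hext] at hcnt
    rw [rr_countP_or _ _ _ (by
      intro a _
      simp
      omega)] at hcnt
    rw [rr_countP_enum_gt] at hcnt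
    rw [rr_countP_enum_eq score[i] score 0 i] at hcnt
    -- B's value at i
    rw [List.getElem_map, PySem.List.getElem_enumerate]
    show rlabel (p : Int) = bLabel score ((0 : Int) + (i : Int), score[i])
    unfold bLabel
    rw [PySem.List.slice_to score (by omega)]
    have htoNat : ((0 : Int) + (i : Int)).toNat = i := by omega
    rw [htoNat]
    rw [← rr_label_eq p (score.countP (fun t => decide (score[i] < t)))
          ((score.take i).countP (fun t => decide (t = score[i]))) hcnt]
    rw [← List.countP_eq_length_filter, ← List.countP_eq_length_filter]

-- ===== VERDICT (by name: the statement is the Claim_ definition above) =====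
theorem relativerank_spec : Claim_equal_relativerank := by
  intro score _
  show relativerank score = relativerank_alt score
  exact rr_main score
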